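-- pv_equiv track=rewrite | github.com/GokoshiJr/algoritmos2 | src/modular/13.dImpares.py | impar
-- ===== SOURCE A (Python) =====
-- def impar(num):
--     aux = num
--     digito = 0
--     array = []
--     while (aux > 0):
--         digito = aux % 10
--         aux //= 10
--         if (digito % 2 == 0):
--             array.append(digito)
--     array.reverse()
--     return (array)
-- ===== SOURCE B (Python) =====
-- def impar(num):
--     if num <= 0:
--         return []
--     return [int(c) for c in str(num) if int(c) % 2 == 0]
-- ===== Notes on version B (the rewrite author's own statement) =====
-- stated objective: simpler
-- what changed: B extracts digits via str(num) and scans them left to right with a comprehension, removing the modular-arithmetic loop and the final reverse.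
import Mathlib
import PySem

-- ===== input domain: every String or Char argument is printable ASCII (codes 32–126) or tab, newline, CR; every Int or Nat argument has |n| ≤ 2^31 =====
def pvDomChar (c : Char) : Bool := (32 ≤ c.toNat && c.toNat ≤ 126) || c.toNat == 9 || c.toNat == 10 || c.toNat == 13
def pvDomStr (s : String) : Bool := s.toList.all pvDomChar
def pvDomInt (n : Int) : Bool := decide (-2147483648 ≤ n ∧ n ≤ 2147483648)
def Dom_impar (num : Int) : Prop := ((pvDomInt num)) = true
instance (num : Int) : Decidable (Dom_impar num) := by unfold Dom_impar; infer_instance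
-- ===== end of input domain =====

-- B replaces A's modular-arithmetic loop + final reverse by a left-to-right scan of str(num); objective: simpler.

theorem pvFdivTen (aux : Int) : Int.fdiv aux 10 = aux / 10 := by
  rw [Int.fdiv_eq_ediv]; simp

-- ===== PORT A =====
-- while (aux > 0): digito = aux % 10; aux //= 10; if digito % 2 == 0: array.append(digito)
def imparLoop (aux : Int) (array : List Int) : List Int :=
  if h : aux > 0 then
    let digito := PySem.Int.mod aux 10
    imparLoop (PySem.Int.floordiv aux 10)
      (if PySem.Int.mod digito 2 == 0 then array ++ [digito] else array)
  else array
termination_by aux.toNat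
decreasing_by
  simp only [PySem.Int.floordiv, pvFdivTen]
  omega

def impar (num : Int) : List Int := (imparLoop num []).reverse

-- ===== PORT B =====
-- if num <= 0: return [];  return [int(c) for c in str(num) if int(c) % 2 == 0]
def impar_alt (num : Int) : List Int :=
  if num ≤ 0 then []
  else (PySem.Int.toStr num).toList.filterMap (fun c =>
    let d : Int := (c.toNat : Int) - 48   -- int(c) for a digit character
    if PySem.Int.mod d 2 == 0 then some d else none)

-- ===== PRECONDITION & SPEC =====
def Spec_impar (num : Int) (out : List Int) : Prop := out = impar_alt num
instance (num : Int) (out : List Int) : Decidable (Spec_impar num out) := by unfold Spec_impar; infer_instance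

-- ===== CLAIM (what is proved, stated in full; the proofs are below) =====
def Claim_equal_impar : Prop := ∀ (num : Int), Dom_impar num → Spec_impar num (impar num)

-- ===== LEMMAS AND PROOFS =====

-- decimal digits of m, most significant first (= what Nat.toDigits 10 produces, as numbers)
def natDigitsMSD (m : Nat) : List Nat :=
  if h : m < 10 then [m] else natDigitsMSD (m / 10) ++ [m % 10]
decreasing_by omega

-- even digits of m, least significant first (= what A's loop appends)
def evens (m : Nat) : List Nat :=
  if h : m = 0 then []
  else (if m % 10 % 2 = 0 then [m % 10] else []) ++ evens (m / 10)
decreasing_by omega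

theorem toDigitsCore_spec (f : Nat) : ∀ (m : Nat) (acc : List Char), m < f →
    Nat.toDigitsCore 10 f m acc = (natDigitsMSD m).map Nat.digitChar ++ acc := by
  induction f with
  | zero => intro m acc h; omega
  | succ f ih =>
    intro m acc hf
    rw [Nat.toDigitsCore]
    by_cases h10 : m / 10 = 0
    · have hm10 : m < 10 := by omega
      rw [if_pos h10, natDigitsMSD, dif_pos hm10, Nat.mod_eq_of_lt hm10]
      rfl
    · have hm10 : ¬ m < 10 := by omega
      rw [if_neg h10, ih (m / 10) _ (by omega),
        show natDigitsMSD m = natDigitsMSD (m / 10) ++ [m % 10] from by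
          rw [natDigitsMSD, dif_neg hm10]]
      simp

theorem toDigits_spec (m : Nat) :
    Nat.toDigits 10 m = (natDigitsMSD m).map Nat.digitChar := by
  rw [Nat.toDigits, toDigitsCore_spec _ _ _ (by omega)]; simp

theorem digitsMSD_lt (m : Nat) : ∀ d ∈ natDigitsMSD m, d < 10 := by
  induction m using Nat.strong_induction_on with
  | _ m ih =>
    rw [natDigitsMSD]
    by_cases h : m < 10
    · rw [dif_pos h]; intro d hd; simp at hd; omega
    · rw [dif_neg h]
      intro d hd
      rcases List.mem_append.mp hd with hd | hd
      · exact ih (m / 10) (by omega) d hd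
      · simp at hd; omega

theorem filter_digitsMSD (m : Nat) (hm : 0 < m) :
    (natDigitsMSD m).filter (fun d => d % 2 = 0) = (evens m).reverse := by
  induction m using Nat.strong_induction_on with
  | _ m ih =>
    rw [natDigitsMSD, evens, dif_neg (by omega : ¬ m = 0)]
    have hmm : m % 10 % 2 = m % 2 := Nat.mod_mod_of_dvd m (by norm_num)
    by_cases h : m < 10
    · rw [dif_pos h]
      have hdiv : m / 10 = 0 := by omega
      rw [hdiv, evens, dif_pos rfl, Nat.mod_eq_of_lt h]
      rcases Nat.mod_two_eq_zero_or_one m with h2 | h2 <;>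
        simp [List.filter, h2]
    · rw [dif_neg h, List.filter_append, List.reverse_append,
        ih (m / 10) (by omega) (by omega)]
      congr 1
      rcases Nat.mod_two_eq_zero_or_one m with h2 | h2 <;>
        simp [List.filter, h2]

theorem cast_mod_two_beq (c : Nat) :
    (PySem.Int.mod ((c : Nat) : Int) 2 == 0) = decide (c % 2 = 0) := by
  have h2 : PySem.Int.mod (c : Int) 2 = ((c % 2 : Nat) : Int) := by
    simp [PySem.Int.mod, Int.fmod_eq_emod]
  rw [h2]
  by_cases he : c % 2 = 0
  · simp [he]
  · have h1 : c % 2 = 1 := by omega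
    rw [h1]
    decide

theorem imparLoop_spec (m : Nat) : ∀ (acc : List Int),
    imparLoop (m : Int) acc = acc ++ (evens m).map (fun (d : Nat) => (d : Int)) := by
  induction m using Nat.strong_induction_on with
  | _ m ih =>
    intro acc
    by_cases h0 : m = 0
    · subst h0; rw [imparLoop, evens]; simp
    · have hpos : ((m : Int)) > 0 := by exact_mod_cast Nat.pos_of_ne_zero h0
      rw [imparLoop, dif_pos hpos, evens, dif_neg h0]
      have hmod : PySem.Int.mod (m : Int) 10 = ((m % 10 : Nat) : Int) := by
        simp [PySem.Int.mod, Int.fmod_eq_emod]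
      have hdiv : PySem.Int.floordiv (m : Int) 10 = ((m / 10 : Nat) : Int) := by
        simp only [PySem.Int.floordiv, pvFdivTen]
        push_cast
        rfl
      simp only [hmod, hdiv, cast_mod_two_beq]
      rw [ih (m / 10) (by omega)]
      by_cases he : m % 10 % 2 = 0
      · rw [if_pos (by simp only [decide_eq_true_eq]; exact he), if_pos he]
        simp
      · rw [if_neg (by simp only [decide_eq_true_eq]; exact he), if_neg he]
        simp

theorem digitChar_int (d : Nat) (hd : d < 10) :
    ((Nat.digitChar d).toNat : Int) - 48 = (d : Int) := by
  interval_cases d <;> decide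

theorem filterMap_even_cast (l : List Nat) :
    l.filterMap (fun (c : Nat) => if c % 2 = 0 then some ((c : Int)) else none)
      = (l.filter (fun d => d % 2 = 0)).map (fun (d : Nat) => (d : Int)) := by
  induction l with
  | nil => rfl
  | cons a l ihl =>
    by_cases ha : a % 2 = 0
    · rw [List.filterMap_cons, if_pos ha, List.filter_cons, if_pos (by simpa using ha),
        List.map_cons, ihl]
    · rw [List.filterMap_cons, if_neg ha, List.filter_cons, if_neg (by simpa using ha), ihl]

-- ===== VERDICT (by name: the statement is the Claim_ definition above) =====
theorem impar_spec : Claim_equal_impar := by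
  intro num _
  unfold Spec_impar impar impar_alt
  by_cases hle : num ≤ 0
  · have h : ¬ num > 0 := by omega
    rw [imparLoop, dif_neg h, if_pos hle]
    rfl
  · rw [if_neg hle]
    have hm : num = ((num.toNat : Nat) : Int) := by omega
    have hmpos : 0 < num.toNat := by omega
    rw [hm, imparLoop_spec, List.nil_append, PySem.Int.toStr]
    have hlt : ¬ ((num.toNat : Int) < 0) := by omega
    simp only [PySem.Int.toChars, hlt, if_false, Int.toNat_natCast]
    rw [show (String.ofList (Nat.toDigits 10 num.toNat)).toList
          = Nat.toDigits 10 num.toNat from String.toList_ofList]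
    rw [toDigits_spec, List.filterMap_map]
    rw [List.filterMap_congr (g := fun (c : Nat) => if c % 2 = 0 then some ((c : Int)) else none)
      (by
        intro c hc
        have hc10 := digitsMSD_lt _ c hc
        simp only [Function.comp, digitChar_int c hc10, cast_mod_two_beq]
        by_cases he : c % 2 = 0
        · rw [if_pos (by simp only [decide_eq_true_eq]; exact he), if_pos he]
        · rw [if_neg (by simp only [decide_eq_true_eq]; exact he), if_neg he])]
    rw [filterMap_even_cast, filter_digitsMSD _ hmpos]
    simp
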